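-- pv_equiv track=rewrite | github.com/GitMonsters/octotetrahedral-agi | core/primitives.py | p_gravity_up
-- ===== SOURCE A (Python) =====
-- from typing import List, Dict, Tuple, Optional, Callable, Any, Set
-- from collections import Counter
--
-- Grid = List[List[int]]
--
-- def p_gravity_up(grid: Grid) -> Grid:
--     rows, cols = len(grid), len(grid[0])
--     bg = _bg(grid)
--     result = [[bg]*cols for _ in range(rows)]
--     for c in range(cols):
--         vals = [grid[r][c] for r in range(rows) if grid[r][c] != bg]
--         for i, v in enumerate(vals):
--             result[i][c] = v
--     return result
--
-- def _bg(grid: Grid) -> int: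
--     counts = Counter(c for row in grid for c in row)
--     return counts.most_common(1)[0][0] if counts else 0
-- ===== SOURCE B (Python) =====
-- from collections import Counter
--
-- def p_gravity_up(grid):
--     rows, cols = len(grid), len(grid[0])
--     bg = _bg(grid)
--     result = [[bg] * cols for _ in range(rows)]
--     fill = [0] * cols
--     for row in grid:
--         for c in range(cols):
--             v = row[c]
--             if v != bg:
--                 result[fill[c]][c] = v
--                 fill[c] += 1
--     return result
--
-- def _bg(grid):
--     counts = Counter(c for row in grid for c in row)
--     return counts.most_common(1)[0][0] if counts else 0
-- ===== Notes on version B (the rewrite author's own statement) =====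
-- stated objective: alternative
-- what changed: Replaces the per-column collect-then-place passes (build vals list for each column, then enumerate-write it) by one streaming row-major sweep that writes each non-background cell directly at a per-column fill pointer, with no intermediate lists.
import Mathlib
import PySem

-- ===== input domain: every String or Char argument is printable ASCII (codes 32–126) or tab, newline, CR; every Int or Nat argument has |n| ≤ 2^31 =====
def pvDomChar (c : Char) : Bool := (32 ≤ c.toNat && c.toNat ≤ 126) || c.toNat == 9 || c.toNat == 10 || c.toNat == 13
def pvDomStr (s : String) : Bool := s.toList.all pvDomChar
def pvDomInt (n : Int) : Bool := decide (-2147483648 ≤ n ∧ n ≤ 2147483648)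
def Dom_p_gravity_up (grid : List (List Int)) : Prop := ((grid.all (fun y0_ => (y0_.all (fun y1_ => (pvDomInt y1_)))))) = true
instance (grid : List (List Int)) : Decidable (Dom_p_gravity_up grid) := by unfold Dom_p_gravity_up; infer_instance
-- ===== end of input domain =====

-- B replaces A's per-column collect-then-place passes by one streaming row-major sweep with
-- per-column fill pointers (objective: alternative decomposition, same O(rows*cols) cost).

-- ===== PORT A =====
-- `_bg` (identical helper in both Pythons): Counter over all cells, then most_common(1)[0][0]
-- (= head of the items stably sorted by count descending) if the counter is nonempty, else 0.
def pvBg (grid : List (List Int)) : Int :=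
  let counts := PySem.Dict.counter (grid.flatMap (fun row => row))
  match PySem.List.sorted counts.items (fun kv => kv.2) true with
  | [] => 0
  | kv :: _ => kv.1

-- `result[i][c] = v`; under Pre_ the indices are in range (out of range Python raises, excluded).
def pvSet2 (res : List (List Int)) (i c : Nat) (v : Int) : List (List Int) :=
  res.set i ((res.getD i []).set c v)

-- grid[r][c] is ported as getD (in range under Pre_, where Python would otherwise raise).
def p_gravity_up (grid : List (List Int)) : List (List Int) :=
  let rows := grid.length
  let cols := (grid.headD []).length
  let bg := pvBg grid
  let result := List.replicate rows (List.replicate cols bg)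
  (List.range cols).foldl (fun result c =>
    let vals := ((List.range rows).map (fun r => (grid.getD r []).getD c 0)).filter
      (fun v => v != bg)
    (vals.zipIdx).foldl (fun result iv => pvSet2 result iv.2 c iv.1) result) result

-- ===== PORT B =====
def p_gravity_up_alt (grid : List (List Int)) : List (List Int) :=
  let rows := grid.length
  let cols := (grid.headD []).length
  let bg := pvBg grid
  (grid.foldl (fun (st : List (List Int) × List Nat) row =>
      (List.range cols).foldl (fun st c =>
        let v := row.getD c 0
        if v != bg then (pvSet2 st.1 (st.2.getD c 0) c v, st.2.set c (st.2.getD c 0 + 1))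
        else st) st)
    (List.replicate rows (List.replicate cols bg), List.replicate cols 0)).1

-- ===== PRECONDITION & SPEC =====
-- Pre_ excludes exactly the inputs where A raises IndexError: the empty grid (len(grid[0]))
-- and ragged grids with some row shorter than grid[0] (grid[r][c] out of range).
def Pre_p_gravity_up (grid : List (List Int)) : Prop :=
  grid ≠ [] ∧ ∀ row ∈ grid, (grid.headD []).length ≤ row.length
instance (grid : List (List Int)) : Decidable (Pre_p_gravity_up grid) := by
  unfold Pre_p_gravity_up; infer_instance

def pvWitness_p_gravity_up : List (List Int) := [[1, 0], [0, 2]]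

def Spec_p_gravity_up (grid : List (List Int)) (out : List (List Int)) : Prop := out = p_gravity_up_alt grid
instance (grid : List (List Int)) (out : List (List Int)) : Decidable (Spec_p_gravity_up grid out) := by unfold Spec_p_gravity_up; infer_instance

-- ===== CLAIM (what is proved, stated in full; the proofs are below) =====
def Claim_equal_p_gravity_up : Prop := ∀ (grid : List (List Int)), Dom_p_gravity_up grid → Pre_p_gravity_up grid → Spec_p_gravity_up grid (p_gravity_up grid)

-- ===== LEMMAS AND PROOFS =====

-- entry (i, c) of a result matrix
def pvE (res : List (List Int)) (i c : Nat) : Int := (res.getD i []).getD c 0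

-- the non-background values of column c, top to bottom
def pvColv (grid : List (List Int)) (bg : Int) (c : Nat) : List Int :=
  (grid.map (fun row => row.getD c 0)).filter (fun v => v != bg)

-- the common target matrix: row i, column c holds the i-th non-background value of column c
def pvSpec (grid : List (List Int)) : List (List Int) :=
  (List.range grid.length).map (fun i =>
    (List.range (grid.headD []).length).map (fun c =>
      (pvColv grid (pvBg grid) c).getD i (pvBg grid)))

-- A's outer fold, cut off after the first j columns
def pvFoldA (grid : List (List Int)) (bg : Int) (m : Nat) (j : Nat) : List (List Int) :=
  (List.range j).foldl (fun result c =>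
    ((((List.range grid.length).map (fun r => (grid.getD r []).getD c 0)).filter
      (fun v => v != bg)).zipIdx).foldl (fun result iv => pvSet2 result iv.2 c iv.1) result)
    (List.replicate grid.length (List.replicate m bg))

-- B's row step, cut off after the first j columns
def pvRowFold (row : List Int) (bg : Int) (st : List (List Int) × List Nat) (j : Nat) :
    List (List Int) × List Nat :=
  (List.range j).foldl (fun st c =>
    let v := row.getD c 0
    if v != bg then (pvSet2 st.1 (st.2.getD c 0) c v, st.2.set c (st.2.getD c 0 + 1))
    else st) st

-- B's row step (all m columns)
def pvRowB (bg : Int) (m : Nat) (st : List (List Int) × List Nat) (row : List Int) :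
    List (List Int) × List Nat :=
  pvRowFold row bg st m

theorem length_pvSet2 (res : List (List Int)) (i c : Nat) (v : Int) :
    (pvSet2 res i c v).length = res.length := by
  simp [pvSet2]

theorem rowlen_pvSet2 (res : List (List Int)) (i c : Nat) (v : Int) (j : Nat) :
    ((pvSet2 res i c v).getD j []).length = (res.getD j []).length := by
  simp only [pvSet2, List.getD_eq_getElem?_getD, List.getElem?_set]
  by_cases h : i = j
  · subst h
    by_cases hi : i < res.length <;> simp [hi]
  · simp [h]

theorem pvE_pvSet2 (res : List (List Int)) (i c : Nat) (v : Int) (i' c' : Nat)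
    (hi : i < res.length) (hc : c < (res.getD i []).length) :
    pvE (pvSet2 res i c v) i' c' = if i' = i ∧ c' = c then v else pvE res i' c' := by
  rw [List.getD_eq_getElem?_getD] at hc
  simp only [pvE, pvSet2, List.getD_eq_getElem?_getD, List.getElem?_set]
  by_cases h : i = i'
  · subst h
    simp only [hi, if_pos]
    by_cases h2 : c = c'
    · subst h2
      simp [hc]
    · simp [h2, Ne.symm h2]
  · rw [if_neg h, if_neg (fun w : i' = i ∧ c' = c => h w.1.symm)]

theorem pv_getD_set (l : List Nat) (j c x : Nat) (hj : j < l.length) :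
    (l.set j x).getD c 0 = if c = j then x else l.getD c 0 := by
  simp only [List.getD_eq_getElem?_getD, List.getElem?_set]
  by_cases h : j = c
  · subst h; simp [hj]
  · rw [if_neg h, if_neg (fun w : c = j => h w.symm)]

-- common conclusion: a matrix whose entries are the stacked columns IS pvSpec

theorem pv_getD_concat (l : List Int) (a d : Int) : (l ++ [a]).getD l.length d = a := by
  simp [List.getD_eq_getElem?_getD]

theorem pv_getD_append (l : List Int) (a d : Int) (i : Nat) (h : i < l.length) :
    (l ++ [a]).getD i d = l.getD i d := by
  simp [List.getD_eq_getElem?_getD, List.getElem?_append_left h]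

theorem pv_map_range_getD (l : List (List Int)) (c : Nat) :
    (List.range l.length).map (fun r => (l.getD r []).getD c 0)
      = l.map (fun row => row.getD c 0) := by
  apply List.ext_getElem (by simp)
  intro i h1 h2
  simp at h1
  simp [List.getElem?_eq_getElem h1]

theorem pvColv_length_le (grid : List (List Int)) (bg : Int) (c : Nat) :
    (pvColv grid bg c).length ≤ grid.length := by
  simp [pvColv]
  exact le_trans (List.length_filter_le _ _) (by simp)

theorem pvColv_append_singleton (p : List (List Int)) (row : List Int) (bg : Int) (c : Nat) :
    pvColv (p ++ [row]) bg c =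
      pvColv p bg c ++ (if row.getD c 0 != bg then [row.getD c 0] else []) := by
  simp [pvColv]
  split <;> simp_all

theorem colwrite (c : Nat) (vs : List Int) : ∀ (k : Nat) (res : List (List Int)),
    k + vs.length ≤ res.length →
    (∀ j < res.length, c < (res.getD j []).length) →
    ((vs.zipIdx k).foldl (fun r iv => pvSet2 r iv.2 c iv.1) res).length = res.length ∧
    (∀ j, (((vs.zipIdx k).foldl (fun r iv => pvSet2 r iv.2 c iv.1) res).getD j []).length
        = (res.getD j []).length) ∧
    (∀ i c', pvE ((vs.zipIdx k).foldl (fun r iv => pvSet2 r iv.2 c iv.1) res) i c' =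
      if c' = c ∧ k ≤ i ∧ i < k + vs.length then vs.getD (i - k) 0 else pvE res i c') := by
  induction vs with
  | nil =>
    intro k res _ _
    refine ⟨by simp, fun j => by simp, fun i c' => ?_⟩
    rw [if_neg (by simp only [List.length_nil]; omega)]
    simp
  | cons v tl ih =>
    intro k res hlen hrow
    simp only [List.length_cons] at hlen
    rw [List.zipIdx_cons, List.foldl_cons]
    have hk : k < res.length := by omega
    have hl1 : (pvSet2 res k c v).length = res.length := length_pvSet2 res k c v
    have hr1 : ∀ j, ((pvSet2 res k c v).getD j []).length = (res.getD j []).length :=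
      rowlen_pvSet2 res k c v
    obtain ⟨ih1, ih2, ih3⟩ := ih (k + 1) (pvSet2 res k c v)
      (by rw [hl1]; omega)
      (fun j hj => by rw [hr1]; exact hrow j (by rwa [hl1] at hj))
    refine ⟨ih1.trans hl1, fun j => (ih2 j).trans (hr1 j), fun i c' => ?_⟩
    simp only [List.length_cons]
    rw [ih3 i c', pvE_pvSet2 res k c v i c' hk (hrow k hk)]
    by_cases hc' : c' = c
    · subst hc'
      by_cases h1 : k + 1 ≤ i ∧ i < k + 1 + tl.length
      · rw [if_pos ⟨rfl, h1⟩, if_pos ⟨rfl, by omega⟩]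
        have hsub : i - k = (i - (k + 1)) + 1 := by omega
        rw [hsub, List.getD_cons_succ]
      · rw [if_neg (fun w => h1 w.2)]
        by_cases hik : i = k
        · subst hik
          rw [if_pos ⟨rfl, rfl⟩, if_pos ⟨rfl, by omega⟩]
          simp
        · rw [if_neg (fun w => hik w.1), if_neg (by
            intro w
            exact absurd w.2 (by omega))]
    · rw [if_neg (fun w => hc' w.1), if_neg (fun w => hc' w.2), if_neg (fun w => hc' w.1)]

theorem pv_ext_spec (grid : List (List Int)) (res : List (List Int))
    (hlen : res.length = grid.length)
    (hrow : ∀ r < grid.length, (res.getD r []).length = (grid.headD []).length)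
    (hent : ∀ i c, i < grid.length → c < (grid.headD []).length →
      pvE res i c = if i < (pvColv grid (pvBg grid) c).length
        then (pvColv grid (pvBg grid) c).getD i 0 else pvBg grid) :
    res = pvSpec grid := by
  apply List.ext_getElem (by simp [pvSpec, hlen])
  intro i h1 h2
  have hi : i < grid.length := by rwa [hlen] at h1
  have hri := hrow i hi
  rw [List.getD_eq_getElem res [] h1] at hri
  apply List.ext_getElem
  · simp [pvSpec, hri]
  · intro c hc1 hc2
    have hcm : c < (grid.headD []).length := by rw [← hri]; exact hc1
    have hval := hent i c hi hcm
    rw [pvE, List.getD_eq_getElem res [] h1, List.getD_eq_getElem res[i] 0 hc1] at hval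
    rw [hval]
    simp only [pvSpec, List.getElem_map, List.getElem_range]
    by_cases hil : i < (pvColv grid (pvBg grid) c).length
    · rw [if_pos hil, List.getD_eq_getElem _ 0 hil, List.getD_eq_getElem _ _ hil]
    · rw [if_neg hil, List.getD_eq_default _ _ (by omega)]

theorem invA (grid : List (List Int)) (bg : Int) (m : Nat) :
    ∀ j, j ≤ m →
    (pvFoldA grid bg m j).length = grid.length ∧
    (∀ r < grid.length, ((pvFoldA grid bg m j).getD r []).length = m) ∧
    (∀ i c, i < grid.length → c < m →
      pvE (pvFoldA grid bg m j) i c = if c < j ∧ i < (pvColv grid bg c).length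
        then (pvColv grid bg c).getD i 0 else bg) := by
  intro j
  induction j with
  | zero =>
    intro _
    refine ⟨by simp [pvFoldA], fun r hr => ?_, fun i c hi hc => ?_⟩
    · simp [pvFoldA, List.getD_eq_getElem?_getD, hr]
    · simp [pvFoldA, pvE, List.getD_eq_getElem?_getD, hi, hc]
  | succ j ihj =>
    intro hj1
    obtain ⟨ih1, ih2, ih3⟩ := ihj (by omega)
    have hstep : pvFoldA grid bg m (j + 1) =
        (((pvColv grid bg j).zipIdx).foldl (fun result iv => pvSet2 result iv.2 j iv.1)
          (pvFoldA grid bg m j)) := by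
      simp only [pvFoldA, List.range_succ, List.foldl_append, List.foldl_cons, List.foldl_nil,
        pv_map_range_getD]
      rfl
    have hlenv : (pvColv grid bg j).length ≤ (pvFoldA grid bg m j).length := by
      rw [ih1]; exact pvColv_length_le grid bg j
    obtain ⟨cw1, cw2, cw3⟩ := colwrite j (pvColv grid bg j) 0 (pvFoldA grid bg m j)
      (by omega)
      (fun r hr => by rw [ih2 r (by rwa [ih1] at hr)]; omega)
    rw [hstep]
    refine ⟨cw1.trans ih1, fun r hr => (cw2 r).trans (ih2 r hr), fun i c hi hc => ?_⟩
    rw [cw3 i c, ih3 i c hi hc]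
    by_cases hcj : c = j
    · subst hcj
      split_ifs <;> first | rfl | omega
    · split_ifs <;> first | rfl | omega

theorem pvA_eq_foldA (grid : List (List Int)) :
    p_gravity_up grid = pvFoldA grid (pvBg grid) (grid.headD []).length (grid.headD []).length := rfl

theorem p_gravity_up_eq_spec (grid : List (List Int)) :
    p_gravity_up grid = pvSpec grid := by
  obtain ⟨h1, h2, h3⟩ := invA grid (pvBg grid) (grid.headD []).length (grid.headD []).length le_rfl
  rw [pvA_eq_foldA]
  refine pv_ext_spec grid _ h1 h2 (fun i c hi hc => ?_)
  rw [h3 i c hi hc]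
  split_ifs <;> first | rfl | omega

-- one row of B's sweep, cut off after the first j columns
theorem invRow (row : List Int) (bg : Int) (n m : Nat) (p : List (List Int)) (hp : p.length < n) :
    ∀ j, j ≤ m → ∀ st : List (List Int) × List Nat,
    st.1.length = n → (∀ r < n, (st.1.getD r []).length = m) → st.2.length = m →
    (∀ c < m, st.2.getD c 0 = (pvColv p bg c).length) →
    (∀ i c, i < n → c < m → pvE st.1 i c = if i < (pvColv p bg c).length
      then (pvColv p bg c).getD i 0 else bg) →
    (pvRowFold row bg st j).1.length = n ∧
    (∀ r < n, ((pvRowFold row bg st j).1.getD r []).length = m) ∧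
    (pvRowFold row bg st j).2.length = m ∧
    (∀ c < m, (pvRowFold row bg st j).2.getD c 0 =
      (if c < j then pvColv (p ++ [row]) bg c else pvColv p bg c).length) ∧
    (∀ i c, i < n → c < m → pvE (pvRowFold row bg st j).1 i c =
      if i < (if c < j then pvColv (p ++ [row]) bg c else pvColv p bg c).length
      then (if c < j then pvColv (p ++ [row]) bg c else pvColv p bg c).getD i 0 else bg) := by
  intro j
  induction j with
  | zero =>
    intro _ st h1 h2 h3 h4 h5
    simp only [pvRowFold, List.range_zero, List.foldl_nil, Nat.not_lt_zero, if_false]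
    exact ⟨h1, h2, h3, h4, h5⟩
  | succ j ihj =>
    intro hj1 st h1 h2 h3 h4 h5
    have hjm : j < m := by omega
    obtain ⟨k1, k2, k3, k4, k5⟩ := ihj (by omega) st h1 h2 h3 h4 h5
    have hstep : pvRowFold row bg st (j + 1) =
        (if (row.getD j 0 != bg) = true then
           (pvSet2 (pvRowFold row bg st j).1 ((pvRowFold row bg st j).2.getD j 0) j
              (row.getD j 0),
            (pvRowFold row bg st j).2.set j ((pvRowFold row bg st j).2.getD j 0 + 1))
         else pvRowFold row bg st j) := by
      simp only [pvRowFold, List.range_succ, List.foldl_append, List.foldl_cons, List.foldl_nil]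
    have hfill : (pvRowFold row bg st j).2.getD j 0 = (pvColv p bg j).length := by
      rw [k4 j hjm, if_neg (by omega)]
    have hfn : (pvColv p bg j).length < n :=
      lt_of_le_of_lt (pvColv_length_le p bg j) hp
    by_cases hv : row.getD j 0 = bg
    · rw [hstep, if_neg (by rw [hv]; simp)]
      have hsame : pvColv (p ++ [row]) bg j = pvColv p bg j := by
        rw [pvColv_append_singleton, hv]
        simp
      refine ⟨k1, k2, k3, fun c hc => ?_, fun i c hi hc => ?_⟩
      · rw [k4 c hc]
        congr 1
        by_cases hcj : c = j
        · subst hcj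
          rw [if_neg (by omega), if_pos (by omega), hsame]
        · by_cases hlt : c < j
          · rw [if_pos hlt, if_pos (by omega)]
          · rw [if_neg hlt, if_neg (by omega)]
      · rw [k5 i c hi hc]
        have hsel : (if c < j + 1 then pvColv (p ++ [row]) bg c else pvColv p bg c)
            = (if c < j then pvColv (p ++ [row]) bg c else pvColv p bg c) := by
          by_cases hcj : c = j
          · subst hcj
            rw [if_pos (by omega), if_neg (by omega), hsame]
          · by_cases hlt : c < j
            · rw [if_pos (by omega), if_pos hlt]
            · rw [if_neg (by omega), if_neg hlt]
        rw [hsel]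
    · rw [hstep, if_pos (bne_iff_ne.mpr hv)]
      have hnew : pvColv (p ++ [row]) bg j = pvColv p bg j ++ [row.getD j 0] := by
        rw [pvColv_append_singleton, if_pos (bne_iff_ne.mpr hv)]
      have hifn : (pvColv p bg j).length < (pvRowFold row bg st j).1.length := by omega
      have hjrow : j < ((pvRowFold row bg st j).1.getD (pvColv p bg j).length []).length := by
        rw [k2 _ hfn]; exact hjm
      refine ⟨?_, fun r hr => ?_, ?_, fun c hc => ?_, fun i c hi hc => ?_⟩
      · rw [length_pvSet2, k1]
      · rw [rowlen_pvSet2]; exact k2 r hr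
      · rw [List.length_set, k3]
      · rw [pv_getD_set _ _ _ _ (by rw [k3]; exact hjm)]
        by_cases hcj : c = j
        · subst hcj
          rw [if_pos rfl, if_pos (by omega), hnew, List.length_append, hfill,
            List.length_singleton]
        · rw [if_neg hcj, k4 c hc]
          congr 1
          by_cases hlt : c < j
          · rw [if_pos hlt, if_pos (by omega)]
          · rw [if_neg hlt, if_neg (by omega)]
      · rw [hfill, pvE_pvSet2 _ _ _ _ _ _ hifn hjrow, k5 i c hi hc]
        by_cases hcj : c = j
        · subst hcj
          have hS1 : (if c < c then pvColv (p ++ [row]) bg c else pvColv p bg c)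
              = pvColv p bg c := if_neg (by omega)
          have hS2 : (if c < c + 1 then pvColv (p ++ [row]) bg c else pvColv p bg c)
              = pvColv (p ++ [row]) bg c := if_pos (by omega)
          rw [hS1, hS2, hnew]
          by_cases hif : i = (pvColv p bg c).length
          · rw [if_pos ⟨hif, rfl⟩,
              if_pos (by simp only [List.length_append, List.length_singleton]; omega),
              hif, pv_getD_concat]
          · rw [if_neg (fun w => hif w.1)]
            by_cases hil : i < (pvColv p bg c).length
            · rw [if_pos hil,
                if_pos (by simp only [List.length_append, List.length_singleton]; omega),
                pv_getD_append _ _ _ _ hil]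
            · rw [if_neg hil,
                if_neg (by simp only [List.length_append, List.length_singleton]; omega)]
        · rw [if_neg (fun w => hcj w.2)]
          have hsel : (if c < j + 1 then pvColv (p ++ [row]) bg c else pvColv p bg c)
              = (if c < j then pvColv (p ++ [row]) bg c else pvColv p bg c) := by
            by_cases hlt : c < j
            · rw [if_pos (by omega), if_pos hlt]
            · rw [if_neg (by omega), if_neg hlt]
          rw [hsel]

theorem invB (bg : Int) (n m : Nat) :
    ∀ p : List (List Int), p.length ≤ n →
    (p.foldl (pvRowB bg m) (List.replicate n (List.replicate m bg),
        List.replicate m 0)).1.length = n ∧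
    (∀ r < n, ((p.foldl (pvRowB bg m) (List.replicate n (List.replicate m bg),
        List.replicate m 0)).1.getD r []).length = m) ∧
    (p.foldl (pvRowB bg m) (List.replicate n (List.replicate m bg),
        List.replicate m 0)).2.length = m ∧
    (∀ c < m, (p.foldl (pvRowB bg m) (List.replicate n (List.replicate m bg),
        List.replicate m 0)).2.getD c 0 = (pvColv p bg c).length) ∧
    (∀ i c, i < n → c < m →
      pvE (p.foldl (pvRowB bg m) (List.replicate n (List.replicate m bg),
        List.replicate m 0)).1 i c =
      if i < (pvColv p bg c).length then (pvColv p bg c).getD i 0 else bg) := by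
  intro p
  induction p using List.reverseRecOn with
  | nil =>
    intro _
    refine ⟨by simp, fun r hr => ?_, by simp, fun c hc => ?_, fun i c hi hc => ?_⟩
    · simp [List.getD_eq_getElem?_getD, hr]
    · simp [pvColv, List.getD_eq_getElem?_getD, hc]
    · simp [pvColv, pvE, List.getD_eq_getElem?_getD, hi, hc]
  | append_singleton p row ihp =>
    intro hlen
    have hp : p.length < n := by simp at hlen; omega
    obtain ⟨k1, k2, k3, k4, k5⟩ := ihp (by omega)
    rw [List.foldl_append, List.foldl_cons, List.foldl_nil]
    simp only [pvRowB]
    obtain ⟨r1, r2, r3, r4, r5⟩ := invRow row bg n m p hp m le_rfl _ k1 k2 k3 k4 k5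
    refine ⟨r1, r2, r3, fun c hc => ?_, fun i c hi hc => ?_⟩
    · rw [r4 c hc, if_pos hc]
    · rw [r5 i c hi hc, if_pos hc]
theorem pvB_eq_foldB (grid : List (List Int)) :
    p_gravity_up_alt grid = (grid.foldl (pvRowB (pvBg grid) (grid.headD []).length)
      (List.replicate grid.length (List.replicate (grid.headD []).length (pvBg grid)),
       List.replicate (grid.headD []).length 0)).1 := rfl

theorem p_gravity_up_alt_eq_spec (grid : List (List Int)) :
    p_gravity_up_alt grid = pvSpec grid := by
  obtain ⟨h1, h2, _, _, h5⟩ := invB (pvBg grid) grid.length (grid.headD []).length grid le_rfl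
  rw [pvB_eq_foldB]
  exact pv_ext_spec grid _ h1 h2 h5

-- ===== VERDICT (by name: the statement is the Claim_ definition above) =====
theorem p_gravity_up_spec : Claim_equal_p_gravity_up := by
  intro grid _ _
  unfold Spec_p_gravity_up
  rw [p_gravity_up_eq_spec, p_gravity_up_alt_eq_spec]
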